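-- pv_equiv track=rewrite | github.com/David-Durst/aetherling | aetherling/helpers/test_data_generator.py | stencil_generator
-- ===== SOURCE A (Python) =====
-- def stencil_generator(row_size, inputs_2d):
--   col_size = len(inputs_2d) // row_size
--   num_rows = col_size
--   num_cols = row_size
--   def get_input(r, c):
--       if ((r < 0) or (c < 0)):
--         return 253
--       else:
--         return inputs_2d[r * row_size + c]
--   return [
--       [
--           [
--                 253 if ((r - stencil_r < 0) or (c - stencil_c < 0)) else inputs_2d[(r - stencil_r) * row_size + (c - stencil_c)]
--               for stencil_c in [2,1,0]
--           ] for stencil_r in [2,1,0]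
--       ] for r in range(num_rows) for c in range(num_cols)
--   ]
-- ===== SOURCE B (Python) =====
-- def stencil_generator(row_size, inputs_2d):
--     num_rows = len(inputs_2d) // row_size
--     num_cols = row_size
--     if num_rows <= 0:
--         return []
--     pad = [253] * (num_cols + 2)
--     padded = [pad, pad]
--     for i in range(num_rows):
--         padded.append([253, 253] + inputs_2d[i * row_size:(i + 1) * row_size])
--     return [[padded[r + k][c:c + 3] for k in range(3)]
--             for r in range(num_rows) for c in range(num_cols)]
-- ===== Notes on version B (the rewrite author's own statement) =====
-- stated objective: alternative
-- what changed: B builds a sentinel-padded (num_rows+2)x(num_cols+2) grid once and cuts each 3x3 window out of it with list slices, instead of A's per-element boundary test recomputed for all nine positions of every cell.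
import Mathlib
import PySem

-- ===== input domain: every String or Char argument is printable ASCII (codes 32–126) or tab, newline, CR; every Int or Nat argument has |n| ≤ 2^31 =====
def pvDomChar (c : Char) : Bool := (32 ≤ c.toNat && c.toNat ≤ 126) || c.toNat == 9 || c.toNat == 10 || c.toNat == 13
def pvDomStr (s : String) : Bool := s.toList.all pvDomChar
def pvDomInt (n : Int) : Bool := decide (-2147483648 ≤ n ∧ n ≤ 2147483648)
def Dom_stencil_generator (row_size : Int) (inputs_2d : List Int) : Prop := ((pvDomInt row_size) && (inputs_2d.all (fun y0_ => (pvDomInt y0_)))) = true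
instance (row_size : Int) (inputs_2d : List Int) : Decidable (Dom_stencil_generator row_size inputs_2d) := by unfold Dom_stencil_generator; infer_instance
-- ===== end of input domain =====

-- B replaces A's per-element boundary test by pre-building a sentinel-padded grid once
-- and slicing each 3x3 window out of it (objective: alternative decomposition, same cost).

-- ===== PORT A =====
-- under Pre_ (row_size ≠ 0) every index taken is in range, so pyGetD's default 0 is never used
def stencil_generator (row_size : Int) (inputs_2d : List Int) : List (List (List Int)) :=
  let col_size := PySem.Int.floordiv (PySem.List.len inputs_2d) row_size
  let num_rows := col_size
  let num_cols := row_size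
  (PySem.List.pyRange 0 num_rows 1).flatMap (fun r =>
    (PySem.List.pyRange 0 num_cols 1).map (fun c =>
      ([2, 1, 0] : List Int).map (fun stencil_r =>
        ([2, 1, 0] : List Int).map (fun stencil_c =>
          if r - stencil_r < 0 ∨ c - stencil_c < 0 then (253 : Int)
          else PySem.List.pyGetD inputs_2d ((r - stencil_r) * row_size + (c - stencil_c)) 0))))

-- ===== PORT B =====
def stencil_generator_alt (row_size : Int) (inputs_2d : List Int) : List (List (List Int)) :=
  let num_rows := PySem.Int.floordiv (PySem.List.len inputs_2d) row_size
  let num_cols := row_size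
  if num_rows ≤ 0 then [] else
  let pad : List Int := List.replicate (num_cols + 2).toNat 253
  let padded : List (List Int) :=
    (PySem.List.pyRange 0 num_rows 1).foldl
      (fun acc i => acc ++ [[253, 253] ++ PySem.List.slice inputs_2d (some (i * row_size)) (some ((i + 1) * row_size))])
      [pad, pad]
  (PySem.List.pyRange 0 num_rows 1).flatMap (fun r =>
    (PySem.List.pyRange 0 num_cols 1).map (fun c =>
      (PySem.List.pyRange 0 3 1).map (fun k =>
        PySem.List.slice (PySem.List.pyGetD padded (r + k) []) (some c) (some (c + 3)))))

-- ===== PRECONDITION & SPEC =====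
-- Pre_ excludes only row_size = 0, where Python A raises ZeroDivisionError
def Pre_stencil_generator (row_size : Int) (inputs_2d : List Int) : Prop := row_size ≠ 0
instance (row_size : Int) (inputs_2d : List Int) : Decidable (Pre_stencil_generator row_size inputs_2d) := by unfold Pre_stencil_generator; infer_instance
def pvWitness_stencil_generator : Int × List Int := (2, [1, 2, 3, 4])

def Spec_stencil_generator (row_size : Int) (inputs_2d : List Int) (out : List (List (List Int))) : Prop := out = stencil_generator_alt row_size inputs_2d
instance (row_size : Int) (inputs_2d : List Int) (out : List (List (List Int))) : Decidable (Spec_stencil_generator row_size inputs_2d out) := by unfold Spec_stencil_generator; infer_instance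

-- ===== CLAIM (what is proved, stated in full; the proofs are below) =====
def Claim_equal_stencil_generator : Prop := ∀ (row_size : Int) (inputs_2d : List Int), Dom_stencil_generator row_size inputs_2d → Pre_stencil_generator row_size inputs_2d → Spec_stencil_generator row_size inputs_2d (stencil_generator row_size inputs_2d)

-- ===== LEMMAS AND PROOFS =====

-- the value at padded-grid position (i, j): 253 on the two leading sentinel rows/columns,
-- otherwise the grid cell (i-2, j-2)
def entryOf (R : Nat) (inputs : List Int) (i j : Nat) : Int :=
  if i < 2 ∨ j < 2 then 253 else inputs.getD ((i - 2) * R + (j - 2)) 0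

-- B's padded grid, with its row fold already turned into a map over Nat indices
def paddedOf (R N : Nat) (inputs : List Int) : List (List Int) :=
  [List.replicate (R + 2) (253 : Int), List.replicate (R + 2) 253] ++
    (List.range N).map
      (fun (t : Nat) => [253, 253] ++ PySem.List.slice inputs (some ((t : Int) * (R : Int))) (some (((t : Int) + 1) * (R : Int))))

lemma take3_eq (xs : List Int) (a : Nat) (h : a + 3 ≤ xs.length) :
    (xs.drop a).take 3 = [xs.getD a 0, xs.getD (a + 1) 0, xs.getD (a + 2) 0] := by
  apply List.ext_getElem
  · simp; omega
  · intro i h1 h2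
    simp only [List.length_take, List.length_drop] at h1
    have h3 : i < 3 := by omega
    rw [List.getElem_take, List.getElem_drop]
    interval_cases i <;>
      simp <;> rw [List.getElem?_eq_getElem (by omega)] <;> rfl

-- a row of B's padded grid, read back out of the built list
lemma padded_get (R N : Nat) (inputs : List Int) (i : Nat) (hi : i < N + 2) :
    PySem.List.pyGetD (paddedOf R N inputs) ((i : Nat) : Int) [] =
    if i < 2 then List.replicate (R + 2) 253
    else [253, 253] ++ PySem.List.slice inputs (some (((i - 2 : Nat) : Int) * (R : Int))) (some ((((i - 2 : Nat) : Int) + 1) * (R : Int))) := by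
  unfold paddedOf
  rw [PySem.List.pyGetD_natCast]
  match i, hi with
  | 0, _ => simp
  | 1, _ => simp
  | (m + 2), hi =>
    have hm : m < N := by omega
    simp only [List.getD, List.cons_append, List.nil_append, List.getElem?_cons_succ, if_neg (by omega : ¬ m + 2 < 2)]
    rw [List.getElem?_map, List.getElem?_range hm]
    simp

lemma slice_row_len (R N : Nat) (inputs : List Int) (m : Nat) (hm : m < N) (hlen : N * R ≤ inputs.length) :
    (PySem.List.slice inputs (some ((m : Int) * (R : Int))) (some (((m : Int) + 1) * (R : Int)))).length = R := by
  rw [show ((m : Int) * (R : Int)) = ((m * R : Nat) : Int) by push_cast; ring,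
      show (((m : Int) + 1) * (R : Int)) = (((m + 1) * R : Nat) : Int) by push_cast; ring,
      PySem.List.slice_natCast]
  have h1 : (m + 1) * R ≤ N * R := Nat.mul_le_mul_right _ (by omega)
  have h2 : (m + 1) * R = m * R + R := by ring
  simp only [List.length_take, List.length_drop]
  omega

-- the j-th element of a padded row built from grid row m
lemma row_getD (R N : Nat) (inputs : List Int) (m j : Nat) (hm : m < N)
    (hlen : N * R ≤ inputs.length) (hj : j < R + 2) :
    ([(253 : Int), 253] ++ PySem.List.slice inputs (some ((m : Int) * (R : Int))) (some (((m : Int) + 1) * (R : Int)))).getD j 0 =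
    if j < 2 then 253 else inputs.getD (m * R + (j - 2)) 0 := by
  rw [show ((m : Int) * (R : Int)) = ((m * R : Nat) : Int) by push_cast; ring,
      show (((m : Int) + 1) * (R : Int)) = (((m + 1) * R : Nat) : Int) by push_cast; ring,
      PySem.List.slice_natCast]
  have hRsub : (m + 1) * R - m * R = R := by rw [Nat.succ_mul]; omega
  rw [hRsub]
  match j, hj with
  | 0, _ => simp
  | 1, _ => simp
  | (t + 2), hj =>
    simp only [List.getD, List.cons_append, List.getElem?_cons_succ, if_neg (by omega : ¬ t + 2 < 2),
               Nat.add_sub_cancel]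
    have ht : t < R := by omega
    have h1 : (m + 1) * R ≤ N * R := Nat.mul_le_mul_right _ (by omega)
    have h2 : (m + 1) * R = m * R + R := by ring
    have hlt : m * R + t < inputs.length := by omega
    have hlen' : t < ((inputs.drop (m * R)).take R).length := by
      simp only [List.length_take, List.length_drop]; omega
    rw [List.nil_append, List.getElem?_eq_getElem hlen', List.getElem?_eq_getElem hlt]
    simp [List.getElem_take, List.getElem_drop]

-- A's per-element guarded read equals the padded-grid entry
lemma entryA (R : Nat) (inputs : List Int) (r c : Nat) (sr sc : Int) (di dj : Nat)
    (h1 : sr + (di : Int) = 2) (h2 : sc + (dj : Int) = 2) :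
    (if (r : Int) - sr < 0 ∨ (c : Int) - sc < 0 then (253 : Int)
     else PySem.List.pyGetD inputs (((r : Int) - sr) * (R : Int) + ((c : Int) - sc)) 0) =
    entryOf R inputs (r + di) (c + dj) := by
  unfold entryOf
  by_cases hr : (r : Int) - sr < 0
  · rw [if_pos (Or.inl hr), if_pos (Or.inl (by omega))]
  · by_cases hc : (c : Int) - sc < 0
    · rw [if_pos (Or.inr hc), if_pos (Or.inr (by omega))]
    · rw [if_neg (by omega), if_neg (by omega)]
      have e1 : ((r + di - 2 : Nat) : Int) = (r : Int) - sr := by omega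
      have e2 : ((c + dj - 2 : Nat) : Int) = (c : Int) - sc := by omega
      rw [show ((r : Int) - sr) * (R : Int) + ((c : Int) - sc)
            = (((r + di - 2) * R + (c + dj - 2) : Nat) : Int) by rw [← e1, ← e2]; push_cast; ring,
          PySem.List.pyGetD_natCast]

-- one window row of B: the 3-slice out of padded row i
lemma window_eq (R N : Nat) (inputs : List Int) (hlen : N * R ≤ inputs.length)
    (i c : Nat) (hi : i < N + 2) (hc : c + 3 ≤ R + 2) :
    PySem.List.slice (PySem.List.pyGetD (paddedOf R N inputs) ((i : Nat) : Int) []) (some ((c : Nat) : Int)) (some (((c : Nat) : Int) + 3)) =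
    [entryOf R inputs i c, entryOf R inputs i (c + 1), entryOf R inputs i (c + 2)] := by
  rw [padded_get R N inputs i hi,
      show ((c : Int) + 3) = ((c + 3 : Nat) : Int) by push_cast; ring]
  by_cases h2 : i < 2
  · rw [if_pos h2, PySem.List.slice_natCast, show c + 3 - c = 3 from by omega,
        take3_eq _ c (by simp; omega)]
    have hg : ∀ j, j < R + 2 → (List.replicate (R + 2) (253 : Int)).getD j 0 = 253 := by
      intro j hj
      rw [List.getD_eq_getElem _ _ (by simpa using hj)]; simp
    rw [hg c (by omega), hg (c + 1) (by omega), hg (c + 2) (by omega)]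
    simp [entryOf, h2]
  · rw [if_neg h2, PySem.List.slice_natCast, show c + 3 - c = 3 from by omega]
    have hm : i - 2 < N := by omega
    have hlenrow : ([(253 : Int), 253] ++ PySem.List.slice inputs (some (((i - 2 : Nat) : Int) * (R : Int))) (some ((((i - 2 : Nat) : Int) + 1) * (R : Int)))).length = R + 2 := by
      simp [slice_row_len R N inputs (i - 2) hm hlen]
    rw [take3_eq _ c (by rw [hlenrow]; omega),
        row_getD R N inputs (i - 2) c hm hlen (by omega),
        row_getD R N inputs (i - 2) (c + 1) hm hlen (by omega),
        row_getD R N inputs (i - 2) (c + 2) hm hlen (by omega)]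
    simp [entryOf, h2]

-- the full 3x3 window of one cell agrees between A's form and B's form
lemma cell_eq (R N : Nat) (inputs : List Int) (hlen : N * R ≤ inputs.length)
    (r c : Nat) (hr : r < N) (hc : c < R) :
    ([2, 1, 0] : List Int).map (fun sr => ([2, 1, 0] : List Int).map (fun sc =>
      if ((r : Nat) : Int) - sr < 0 ∨ ((c : Nat) : Int) - sc < 0 then (253 : Int)
      else PySem.List.pyGetD inputs ((((r : Nat) : Int) - sr) * (R : Int) + (((c : Nat) : Int) - sc)) 0)) =
    (PySem.List.pyRange 0 3 1).map (fun k =>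
      PySem.List.slice (PySem.List.pyGetD (paddedOf R N inputs) (((r : Nat) : Int) + k) []) (some ((c : Nat) : Int)) (some (((c : Nat) : Int) + 3))) := by
  have w0 := window_eq R N inputs hlen r c (by omega) (by omega)
  have w1 := window_eq R N inputs hlen (r + 1) c (by omega) (by omega)
  have w2 := window_eq R N inputs hlen (r + 2) c (by omega) (by omega)
  rw [show PySem.List.pyRange 0 3 1 = [0, 1, 2] from by decide]
  simp only [List.map_cons, List.map_nil]
  rw [show ((r : Int) + (0 : Int)) = ((r : Nat) : Int) by omega,
      show ((r : Int) + (1 : Int)) = (((r + 1) : Nat) : Int) by omega,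
      show ((r : Int) + (2 : Int)) = (((r + 2) : Nat) : Int) by omega,
      w0, w1, w2,
      entryA R inputs r c 2 2 0 0 (by norm_num) (by norm_num),
      entryA R inputs r c 2 1 0 1 (by norm_num) (by norm_num),
      entryA R inputs r c 2 0 0 2 (by norm_num) (by norm_num),
      entryA R inputs r c 1 2 1 0 (by norm_num) (by norm_num),
      entryA R inputs r c 1 1 1 1 (by norm_num) (by norm_num),
      entryA R inputs r c 1 0 1 2 (by norm_num) (by norm_num),
      entryA R inputs r c 0 2 2 0 (by norm_num) (by norm_num),
      entryA R inputs r c 0 1 2 1 (by norm_num) (by norm_num),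
      entryA R inputs r c 0 0 2 2 (by norm_num) (by norm_num)]
  norm_num

-- ===== VERDICT (by name: the statement is the Claim_ definition above) =====
set_option maxHeartbeats 1000000 in
theorem stencil_generator_spec : Claim_equal_stencil_generator := by
  intro row_size inputs _ hpre
  unfold Spec_stencil_generator stencil_generator stencil_generator_alt
  simp only [PySem.List.len_eq]
  rcases lt_trichotomy row_size 0 with hneg | hz | hpos
  · -- negative row_size: num_rows = len // row_size ≤ 0, both sides are []
    have hm := PySem.Int.mod_neg_bounds ((inputs.length : Nat) : Int) hneg
    have hd := PySem.Int.floordiv_mul_add_mod ((inputs.length : Nat) : Int) row_size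
    have hq : PySem.Int.floordiv ((inputs.length : Nat) : Int) row_size ≤ 0 := by
      by_contra h
      rw [not_le] at h
      have h1 : PySem.Int.floordiv ((inputs.length : Nat) : Int) row_size * row_size ≤ 1 * row_size :=
        mul_le_mul_of_nonpos_right (by omega) (by omega)
      have h2 : (0 : Int) ≤ ((inputs.length : Nat) : Int) := Int.natCast_nonneg _
      omega
    rw [PySem.List.pyRange_one_eq_nil hq, if_pos hq]
    simp
  · exact absurd hz hpre
  · -- positive row_size: work over Nat
    obtain ⟨R, rfl⟩ : ∃ R : Nat, row_size = (R : Int) := ⟨row_size.toNat, (Int.toNat_of_nonneg hpos.le).symm⟩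
    have hR : 0 < R := by exact_mod_cast hpos
    rw [PySem.Int.floordiv_natCast]
    have hlen : inputs.length / R * R ≤ inputs.length := Nat.div_mul_le_self _ _
    by_cases hN : inputs.length / R = 0
    · have h0 : ((inputs.length / R : Nat) : Int) ≤ 0 := by rw [hN]; simp
      rw [if_pos h0, PySem.List.pyRange_one_eq_nil h0]
      simp
    rw [if_neg (by simp only [not_le]; exact_mod_cast Nat.pos_of_ne_zero hN)]
    rw [show (((R : Int)) + 2).toNat = R + 2 from by omega,
        PySem.List.foldl_append_singleton_eq_map,
        PySem.List.pyRange_zero_natCast (inputs.length / R), PySem.List.pyRange_zero_natCast R]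
    simp only [List.flatMap_map, List.map_map, Function.comp_def]
    apply List.flatMap_congr
    intro r hr
    apply List.map_congr_left
    intro c hc
    simp only [List.mem_range] at hr hc
    simpa [paddedOf] using cell_eq R (inputs.length / R) inputs hlen r c hr hc
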